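-- pv_equiv track=rewrite | github.com/Git-Fg/thecattoolkit | scripts/toolkit-analyzer.py | clean_description_text
-- ===== SOURCE A (Python) =====
-- def clean_description_text(text: str) -> str:
--     """
--     Sanitizes string: removes newlines, double spaces, special chars,
--     and ensures it's a tight single line.
--     """
--     if not text:
--         return ""
--
--     # 1. Replace newlines and tabs with spaces
--     text = text.replace('\n', ' ').replace('\r', ' ').replace('\t', ' ')
--
--     # 2. Remove illegal/invisible special characters (control characters)
--     text = "".join(ch for ch in text if ch.isprintable())
--
--     # 3. Collapse multiple spaces into one and strip edges
--     text = " ".join(text.split())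
--
--     # 4. Ensure it ends with proper punctuation
--     if text and not text.endswith(('.', '!', '?')):
--         text += '.'
--
--     return text
-- ===== SOURCE B (Python) =====
-- def clean_description_text(text: str) -> str:
--     """Single left-to-right scan with a pending-space flag instead of the
--     replace/filter/split/join pipeline."""
--     if not text:
--         return ""
--     buf = []
--     pending = False
--     for ch in text:
--         if ch in '\n\r\t ':
--             pending = True
--         elif not ch.isprintable():
--             continue
--         else:
--             if pending and buf:
--                 buf.append(' ')
--             pending = False
--             buf.append(ch)
--     if buf and buf[-1] not in '.!?':
--         buf.append('.')
--     return ''.join(buf)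
-- ===== Notes on version B (the rewrite author's own statement) =====
-- stated objective: alternative
-- what changed: Replaces A's four-pass replace/filter/split/join pipeline with one left-to-right scan that keeps a result buffer and a pending-space flag, then fixes punctuation on the buffer.
import Mathlib
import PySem

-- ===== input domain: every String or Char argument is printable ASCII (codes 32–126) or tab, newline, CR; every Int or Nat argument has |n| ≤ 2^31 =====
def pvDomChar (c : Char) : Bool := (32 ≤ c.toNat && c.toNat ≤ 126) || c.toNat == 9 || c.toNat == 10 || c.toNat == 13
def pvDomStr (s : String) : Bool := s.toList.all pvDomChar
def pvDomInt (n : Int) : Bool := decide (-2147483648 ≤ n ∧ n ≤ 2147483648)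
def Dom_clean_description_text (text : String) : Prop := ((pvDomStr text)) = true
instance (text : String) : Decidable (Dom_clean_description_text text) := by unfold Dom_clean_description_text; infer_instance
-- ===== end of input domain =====

-- B replaces A's multi-pass replace/filter/split/join pipeline with a single scan
-- keeping a buffer and a pending-space flag (objective: alternative decomposition).

-- ch.isprintable(): exact on the domain's characters (printable ASCII 32–126 plus tab/newline/CR)
def pvPrintable (c : Char) : Bool := 32 ≤ c.toNat && c.toNat ≤ 126

-- ===== PORT A =====
-- step 4 of A: ensure closing punctuation
def pvStep4 (t3 : String) : String :=
  if t3 ≠ "" ∧ (PySem.Str.endswith t3 "." || PySem.Str.endswith t3 "!" || PySem.Str.endswith t3 "?") = false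
  then String.ofList (t3.toList ++ ['.'])
  else t3

def clean_description_text (text : String) : String :=
  if text = "" then ""
  else
    -- steps 1-4 in sequence: replace newlines/tabs, drop non-printables, collapse spaces, punctuate
    pvStep4 (PySem.Str.join " " (PySem.Str.split₀ (String.ofList
      (((PySem.Str.replace (PySem.Str.replace (PySem.Str.replace text "\n" " ") "\r" " ")
          "\t" " ").toList).filter pvPrintable))))

-- ===== PORT B =====
-- the scan loop of Source B; buf is kept in reverse (cons = append), reversed once at the end
def pvScan : List Char → List Char → Bool → List Char
  | [], buf, _ => buf
  | c :: rest, buf, pending =>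
    if c = '\n' || c = '\r' || c = '\t' || c = ' ' then pvScan rest buf true
    else if !pvPrintable c then pvScan rest buf pending
    else pvScan rest (c :: (if pending && !buf.isEmpty then ' ' :: buf else buf)) false

-- if buf and buf[-1] not in '.!?': buf.append('.')   (buf is reversed: last char is the head)
def pvPunct (buf : List Char) : List Char :=
  match buf with
  | [] => []
  | c :: _ => if c = '.' || c = '!' || c = '?' then buf else '.' :: buf

def clean_description_text_alt (text : String) : String :=
  if text = "" then ""
  else String.ofList (pvPunct (pvScan text.toList [] false)).reverse

-- ===== PRECONDITION & SPEC =====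
def Spec_clean_description_text (text : String) (out : String) : Prop := out = clean_description_text_alt text
instance (text : String) (out : String) : Decidable (Spec_clean_description_text text out) := by unfold Spec_clean_description_text; infer_instance

-- ===== CLAIM (what is proved, stated in full; the proofs are below) =====
def Claim_equal_clean_description_text : Prop := ∀ (text : String), Dom_clean_description_text text → Spec_clean_description_text text (clean_description_text text)

-- ===== LEMMAS AND PROOFS =====

-- what the three replaces do to a single character
def pvRepl (c : Char) : Char :=
  if c = '\n' then ' ' else if c = '\r' then ' ' else if c = '\t' then ' ' else c

-- the reversed joined buffer corresponding to an accumulator of words (words stored reversed-order)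
def pvJR (acc : List (List Char)) : List Char := (PySem.Chars.join [' '] acc.reverse).reverse

-- B's buffer corresponding to A's split-state (cur = current word reversed, acc = finished words)
def pvBuf (cur : List Char) (acc : List (List Char)) : List Char :=
  if cur = [] then pvJR acc else cur ++ (if acc = [] then [] else ' ' :: pvJR acc)

theorem pv_join_concat (xs : List (List Char)) (y : List Char) (h : xs ≠ []) :
    PySem.Chars.join [' '] (xs ++ [y]) = PySem.Chars.join [' '] xs ++ ' ' :: y := by
  induction xs with
  | nil => exact absurd rfl h
  | cons a xs ih =>
    cases xs with
    | nil => simp [PySem.Chars.join_cons_cons, PySem.Chars.join_singleton]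
    | cons b xs =>
      simp only [List.cons_append]
      rw [PySem.Chars.join_cons_cons, PySem.Chars.join_cons_cons, ← List.cons_append,
        ih (by simp)]
      simp

theorem pvJR_nil : pvJR [] = [] := by simp [pvJR, PySem.Chars.join_nil]

theorem pvJR_cons (w : List Char) (acc : List (List Char)) :
    pvJR (w :: acc) = w.reverse ++ (if acc = [] then [] else ' ' :: pvJR acc) := by
  cases acc with
  | nil => simp [pvJR, PySem.Chars.join_singleton]
  | cons a acc =>
    have h : acc.reverse ++ [a] ≠ [] := by simp
    show (PySem.Chars.join [' '] ((w :: a :: acc).reverse)).reverse = _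
    rw [show (w :: a :: acc).reverse = (acc.reverse ++ [a]) ++ [w] by simp,
      pv_join_concat _ _ h]
    simp [pvJR]

theorem pvJR_ne_nil (acc : List (List Char)) (ha : acc ≠ []) (hw : ∀ w ∈ acc, w ≠ []) :
    pvJR acc ≠ [] := by
  cases acc with
  | nil => exact absurd rfl ha
  | cons w acc =>
    rw [pvJR_cons]
    have : w ≠ [] := hw w (by simp)
    intro h
    rcases List.append_eq_nil_iff.mp h with ⟨h1, _⟩
    exact this (by simpa using h1)

theorem pv_char_eq_of_toNat {c d : Char} (h : c.toNat = d.toNat) : c = d :=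
  Char.ext (UInt32.toNat_inj.mp h)

-- non-separator domain chars are printable and not Python-whitespace
theorem pv_nonsep_printable (c : Char) (hd : pvDomChar c = true)
    (h1 : c ≠ '\n') (h2 : c ≠ '\r') (h3 : c ≠ '\t') : pvPrintable c = true := by
  have h9 : c.toNat ≠ 9 := fun h => h3 (pv_char_eq_of_toNat (d := '\t') (h.trans (by decide)))
  have h10 : c.toNat ≠ 10 := fun h => h1 (pv_char_eq_of_toNat (d := '\n') (h.trans (by decide)))
  have h13 : c.toNat ≠ 13 := fun h => h2 (pv_char_eq_of_toNat (d := '\r') (h.trans (by decide)))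
  simp only [pvDomChar, Bool.or_eq_true, Bool.and_eq_true, decide_eq_true_eq, beq_iff_eq] at hd
  simp only [pvPrintable, Bool.and_eq_true, decide_eq_true_eq]
  omega

theorem pv_nonsep_not_space (c : Char) (hd : pvDomChar c = true)
    (h1 : c ≠ '\n') (h2 : c ≠ '\r') (h3 : c ≠ '\t') (h4 : c ≠ ' ') :
    PySem.Chars.isspace c = false := by
  have hp := pv_nonsep_printable c hd h1 h2 h3
  simp only [pvPrintable, Bool.and_eq_true, decide_eq_true_eq] at hp
  have h32 : c.toNat ≠ 32 := fun h => h4 (pv_char_eq_of_toNat (h.trans (by decide)))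
  simp only [PySem.Chars.isspace, Bool.or_eq_false_iff, Bool.and_eq_false_iff,
    decide_eq_false_iff_not]
  omega

theorem pv_repl_printable (c : Char) (hd : pvDomChar c = true) :
    pvPrintable (pvRepl c) = true := by
  by_cases h1 : c = '\n'
  · subst h1; decide
  by_cases h2 : c = '\r'
  · subst h2; decide
  by_cases h3 : c = '\t'
  · subst h3; decide
  simpa [pvRepl, h1, h2, h3] using pv_nonsep_printable c hd h1 h2 h3

-- a single-character replace is a map
theorem pv_replace_go_single (a b : Char) :
    ∀ (fuel : Nat) (l : List Char) (acc : List Char), l.length ≤ fuel →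
    PySem.Chars.replace.go [a] [b] fuel l acc
      = acc.reverse ++ l.map (fun c => if c = a then b else c) := by
  intro fuel
  induction fuel with
  | zero =>
    intro l acc h
    have : l = [] := List.eq_nil_of_length_eq_zero (Nat.le_zero.mp h)
    subst this; simp [PySem.Chars.replace.go]
  | succ fuel ih =>
    intro l acc h
    cases l with
    | nil => simp [PySem.Chars.replace.go]
    | cons c t =>
      by_cases hc : c = a
      · subst hc
        have hpre : List.isPrefixOf [c] (c :: t) = true := by simp [List.isPrefixOf]
        rw [PySem.Chars.replace.go]
        simp only [hpre, if_true, List.length_cons, List.drop_succ_cons, List.length_nil, List.drop_zero]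
        rw [ih t _ (by simpa using h)]
        simp
      · have hpre : List.isPrefixOf [a] (c :: t) = false := by
          simp [List.isPrefixOf]
          intro h'; exact absurd h'.symm hc
        rw [PySem.Chars.replace.go]
        simp only [hpre, Bool.false_eq_true, if_false]
        rw [ih t _ (by simpa using h)]
        simp [hc]

theorem pv_replace_single (l : List Char) (a b : Char) :
    PySem.Chars.replace l [a] [b] = l.map (fun c => if c = a then b else c) := by
  simp only [PySem.Chars.replace, List.isEmpty_cons, Bool.false_eq_true, if_false]
  exact pv_replace_go_single a b l.length l [] le_rfl

-- the composed three replaces equal one map with pvRepl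
theorem pv_three_replaces (l : List Char) :
    ((l.map (fun c => if c = '\n' then ' ' else c)).map
        (fun c => if c = '\r' then ' ' else c)).map (fun c => if c = '\t' then ' ' else c)
      = l.map pvRepl := by
  simp only [List.map_map]
  apply List.map_congr_left
  intro c _
  simp only [Function.comp_apply, pvRepl]
  split_ifs with h1 h2 h3 <;> simp_all

-- ===== the main scan/split correspondence =====
theorem pv_scan_go (l : List Char) :
    ∀ (cur : List Char) (acc : List (List Char)) (p : Bool),
    (∀ c ∈ l, pvDomChar c = true) →
    (∀ w ∈ acc, w ≠ []) →
    (cur = [] → (p = true ∨ acc = [])) →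
    (cur ≠ [] → p = false) →
    pvScan l (pvBuf cur acc) p
      = (PySem.Chars.join [' '] (PySem.Chars.split₀.go (l.map pvRepl) cur acc)).reverse := by
  induction l with
  | nil =>
    intro cur acc p _ _ _ _
    by_cases hc : cur = []
    · subst hc
      simp [pvScan, pvBuf, PySem.Chars.split₀.go, pvJR]
    · simp only [List.map_nil, pvScan]
      rw [show PySem.Chars.split₀.go [] cur acc = (cur.reverse :: acc).reverse by
        simp [PySem.Chars.split₀.go, List.isEmpty_iff, hc]]
      have : (PySem.Chars.join [' '] ((cur.reverse :: acc).reverse)).reverse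
          = pvJR (cur.reverse :: acc) := rfl
      rw [this, pvJR_cons, List.reverse_reverse]
      simp [pvBuf, hc]
  | cons c rest ih =>
    intro cur acc p hdom hw hcp hcnp
    have hdc : pvDomChar c = true := hdom c (by simp)
    have hdrest : ∀ x ∈ rest, pvDomChar x = true := fun x hx => hdom x (by simp [hx])
    by_cases hsep : c = '\n' ∨ c = '\r' ∨ c = '\t' ∨ c = ' '
    · -- separator character
      have hb : (c = '\n' || c = '\r' || c = '\t' || c = ' ') = true := by
        rcases hsep with h | h | h | h <;> simp [h]
      have hrepl : pvRepl c = ' ' := by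
        rcases hsep with h | h | h | h <;> simp [pvRepl, h]
      have hsp : PySem.Chars.isspace (pvRepl c) = true := by rw [hrepl]; decide
      rw [show pvScan (c :: rest) (pvBuf cur acc) p = pvScan rest (pvBuf cur acc) true by
        simp [pvScan, hb]]
      rw [List.map_cons, show PySem.Chars.split₀.go (pvRepl c :: rest.map pvRepl) cur acc
          = (if cur.isEmpty then PySem.Chars.split₀.go (rest.map pvRepl) [] acc
             else PySem.Chars.split₀.go (rest.map pvRepl) [] (cur.reverse :: acc)) by
        simp [PySem.Chars.split₀.go, hsp]]
      by_cases hc : cur = []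
      · subst hc
        simp only [List.isEmpty_nil, if_true]
        exact ih [] acc true hdrest hw (fun _ => Or.inl rfl) (fun h => absurd rfl h)
      · rw [if_neg (by simpa [List.isEmpty_iff] using hc)]
        have hbuf : pvBuf cur acc = pvBuf [] (cur.reverse :: acc) := by
          simp [pvBuf, hc, pvJR_cons]
        rw [hbuf]
        exact ih [] (cur.reverse :: acc) true hdrest
          (by intro w hw'; rcases List.mem_cons.mp hw' with h | h
              · subst h; simpa using hc
              · exact hw w h)
          (fun _ => Or.inl rfl) (fun h => absurd rfl h)
    · -- emitted character
      rw [not_or, not_or, not_or] at hsep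
      obtain ⟨h1, h2, h3, h4⟩ := hsep
      have hb : (c = '\n' || c = '\r' || c = '\t' || c = ' ') = false := by
        simp [h1, h2, h3, h4]
      have hpr : pvPrintable c = true := pv_nonsep_printable c hdc h1 h2 h3
      have hrepl : pvRepl c = c := by simp [pvRepl, h1, h2, h3]
      have hsp : PySem.Chars.isspace c = false :=
        pv_nonsep_not_space c hdc h1 h2 h3 h4
      rw [show pvScan (c :: rest) (pvBuf cur acc) p
          = pvScan rest (c :: (if p && !(pvBuf cur acc).isEmpty then ' ' :: pvBuf cur acc
              else pvBuf cur acc)) false by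
        simp [pvScan, hb, hpr]]
      rw [List.map_cons, show PySem.Chars.split₀.go (pvRepl c :: rest.map pvRepl) cur acc
          = PySem.Chars.split₀.go (rest.map pvRepl) (c :: cur) acc by
        rw [PySem.Chars.split₀.go]; simp [hrepl, hsp]]
      have hbuf : (c :: (if p && !(pvBuf cur acc).isEmpty then ' ' :: pvBuf cur acc
          else pvBuf cur acc)) = pvBuf (c :: cur) acc := by
        by_cases hc : cur = []
        · subst hc
          rcases hcp rfl with hp | ha
        -- cur = [], p = true
          · by_cases ha : acc = []
            · subst ha
              simp [pvBuf, pvJR_nil, hp]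
            · have hne : pvJR acc ≠ [] := pvJR_ne_nil acc ha hw
              simp [pvBuf, hp, ha, hne]
          -- cur = [], acc = []
          · subst ha
            simp [pvBuf, pvJR_nil]
        · have hp := hcnp hc
          subst hp
          simp [pvBuf, hc]
      rw [hbuf]
      exact ih (c :: cur) acc false hdrest hw (by simp) (fun _ => rfl)

-- list-level form of A's pipeline stages 1–3
theorem pv_A_words (text : String) (hd : pvDomStr text = true) :
    (PySem.Str.join " " (PySem.Str.split₀ (String.ofList
        (((PySem.Str.replace (PySem.Str.replace (PySem.Str.replace text "\n" " ") "\r" " ")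
            "\t" " ").toList).filter pvPrintable)))).toList
      = PySem.Chars.join [' '] (PySem.Chars.split₀ (text.toList.map pvRepl)) := by
  have hdom : ∀ c ∈ text.toList, pvDomChar c = true := by
    simpa [pvDomStr, List.all_eq_true] using hd
  have h1 : (PySem.Str.replace (PySem.Str.replace (PySem.Str.replace text "\n" " ") "\r" " ")
      "\t" " ").toList = text.toList.map pvRepl := by
    simp only [PySem.Str.replace, String.toList_ofList]
    rw [show ("\n" : String).toList = ['\n'] from rfl,
        show ("\r" : String).toList = ['\r'] from rfl,
        show ("\t" : String).toList = ['\t'] from rfl,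
        show (" " : String).toList = [' '] from rfl]
    rw [pv_replace_single, pv_replace_single, pv_replace_single]
    exact pv_three_replaces text.toList
  have h2 : (text.toList.map pvRepl).filter pvPrintable = text.toList.map pvRepl := by
    apply List.filter_eq_self.mpr
    intro x hx
    rcases List.mem_map.mp hx with ⟨c, hc, rfl⟩
    exact pv_repl_printable c (hdom c hc)
  rw [h1, h2]
  simp only [PySem.Str.join, PySem.Str.split₀, String.toList_ofList, List.map_map]
  have : (String.toList ∘ String.ofList) = id := by funext l; simp
  rw [this, List.map_id]
  rfl

-- endswith on a reversed list is a head test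
theorem pv_endswith_head (W : List Char) (p : Char) :
    PySem.Chars.endswith W [p] = (W.reverse.head? == some p) := by
  simp only [PySem.Chars.endswith, List.isSuffixOf]
  cases h : W.reverse with
  | nil => simp
  | cons c t => simp [List.isPrefixOf, BEq.comm]

theorem pv_step4_eq (W : List Char) :
    pvStep4 (String.ofList W) = String.ofList (pvPunct W.reverse).reverse := by
  cases hWc : W.reverse with
  | nil =>
    have hWnil : W = [] := by simpa using congrArg List.reverse hWc
    subst hWnil
    rfl
  | cons c rbuf =>
    have hWne : W ≠ [] := by intro h; rw [h] at hWc; simp at hWc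
    have hne : String.ofList W ≠ "" := by
      intro h; exact hWne (by simpa using h)
    have hhead : W.reverse.head? = some c := by rw [hWc]; rfl
    have hend : ∀ p : Char, PySem.Str.endswith (String.ofList W) (String.ofList [p]) = (c == p) := by
      intro p
      show PySem.Chars.endswith (String.ofList W).toList (String.ofList [p]).toList = (c == p)
      rw [String.toList_ofList, String.toList_ofList, pv_endswith_head, hhead]
      simp
    unfold pvStep4
    rw [hend '.', hend '!', hend '?']
    by_cases hp : c = '.' ∨ c = '!' ∨ c = '?'
    · have hb : (c == '.' || c == '!' || c == '?') = true := by
        rcases hp with h | h | h <;> simp [h]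
      have hpv : pvPunct (c :: rbuf) = c :: rbuf := by
        rcases hp with h | h | h <;> simp [pvPunct, h]
      rw [if_neg (by simp [hb]), hpv, ← hWc, List.reverse_reverse]
    · rw [not_or, not_or] at hp
      obtain ⟨h1, h2, h3⟩ := hp
      have hb : (c == '.' || c == '!' || c == '?') = false := by simp [h1, h2, h3]
      have hpv : pvPunct (c :: rbuf) = '.' :: c :: rbuf := by simp [pvPunct, h1, h2, h3]
      rw [if_pos ⟨hne, hb⟩, hpv, String.toList_ofList,
        show ('.' :: c :: rbuf).reverse = (c :: rbuf).reverse ++ ['.'] by simp,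
        ← hWc, List.reverse_reverse]

-- ===== VERDICT (by name: the statement is the Claim_ definition above) =====
theorem clean_description_text_spec : Claim_equal_clean_description_text := by
  intro text hdom
  unfold Spec_clean_description_text clean_description_text clean_description_text_alt
  by_cases hempty : text = ""
  · simp [hempty]
  rw [if_neg hempty, if_neg hempty]
  have hdomc : ∀ c ∈ text.toList, pvDomChar c = true := by
    simpa [Dom_clean_description_text, pvDomStr, List.all_eq_true] using hdom
  have hA3 := pv_A_words text (by simpa [Dom_clean_description_text] using hdom)
  have hkey : PySem.Str.join " " (PySem.Str.split₀ (String.ofList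
      (((PySem.Str.replace (PySem.Str.replace (PySem.Str.replace text "\n" " ") "\r" " ")
          "\t" " ").toList).filter pvPrintable)))
      = String.ofList (PySem.Chars.join [' '] (PySem.Chars.split₀ (text.toList.map pvRepl))) := by
    rw [← show String.ofList ((PySem.Str.join " " (PySem.Str.split₀ (String.ofList
      (((PySem.Str.replace (PySem.Str.replace (PySem.Str.replace text "\n" " ") "\r" " ")
          "\t" " ").toList).filter pvPrintable)))).toList)
        = PySem.Str.join " " (PySem.Str.split₀ (String.ofList
      (((PySem.Str.replace (PySem.Str.replace (PySem.Str.replace text "\n" " ") "\r" " ")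
          "\t" " ").toList).filter pvPrintable))) from String.ofList_toList, hA3]
  have hscan : pvScan text.toList [] false
      = (PySem.Chars.join [' '] (PySem.Chars.split₀ (text.toList.map pvRepl))).reverse := by
    have := pv_scan_go text.toList [] [] false hdomc (by simp)
      (fun _ => Or.inr rfl) (fun h => absurd rfl h)
    simpa [pvBuf, pvJR_nil, PySem.Chars.split₀] using this
  rw [hkey, hscan, pv_step4_eq]
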